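-- pv_equiv track=rewrite | github.com/EmptyBucket/BmpSteganography | steganography.py | _bin_message
-- ===== SOURCE A (Python) =====
-- def _bin_message(information, len_byte_message):
--     bin_information_len = bin(len_byte_message)[2:].zfill(32)
--
--     bin_information = []
--     bin_information.append(bin_information_len)
--
--     for byte in information:
--         bin_byte = bin(byte)[2:].zfill(8)
--         bin_information.append(bin_byte)
--     else:
--         bin_information = ''.join(bin_information)
--
--     list_bit = tuple(map(int, bin_information))
--
--     return list_bit
-- ===== SOURCE B (Python) =====
-- def _bits(n, width):
--     out = []
--     while n > 0:
--         out.append(n & 1)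
--         n >>= 1
--     if not out:
--         out.append(0)
--     out.reverse()
--     return [0] * (width - len(out)) + out
--
--
-- def _bin_message(information, len_byte_message):
--     result = _bits(len_byte_message, 32)
--     for byte in information:
--         result += _bits(byte, 8)
--     return tuple(result)
-- ===== Notes on version B (the rewrite author's own statement) =====
-- stated objective: alternative
-- what changed: B computes each number's bits arithmetically (shift/mask loop collecting low bits, reverse, left-pad with zeros) instead of A's bin()/zfill()/''.join()/map(int,...) string pipeline; Pre_ excludes negative ints, on which A raises ValueError.
import Mathlib
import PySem

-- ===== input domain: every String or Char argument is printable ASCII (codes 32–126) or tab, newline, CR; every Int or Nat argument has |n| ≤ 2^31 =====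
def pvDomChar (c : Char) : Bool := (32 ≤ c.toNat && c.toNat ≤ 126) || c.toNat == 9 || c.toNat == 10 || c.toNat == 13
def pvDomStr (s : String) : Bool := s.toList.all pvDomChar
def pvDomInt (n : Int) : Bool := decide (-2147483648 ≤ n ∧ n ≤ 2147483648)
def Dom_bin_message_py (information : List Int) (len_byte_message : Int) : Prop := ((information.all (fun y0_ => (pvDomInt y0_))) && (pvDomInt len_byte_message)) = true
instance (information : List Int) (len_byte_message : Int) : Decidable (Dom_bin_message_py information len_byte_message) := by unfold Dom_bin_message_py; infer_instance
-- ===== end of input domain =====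

-- B computes each number's bits arithmetically (shift/mask loop low-to-high, reverse, left-pad
-- with zeros to the requested width) instead of A's bin()/zfill()/join() string pipeline.

-- ===== PORT A =====
-- int(c) for a single digit char; exact on '0'-'9', which is all Pre_ admits here
def pvDigInt (c : Char) : Int := (c.toNat : Int) - 48

def bin_message_py (information : List Int) (len_byte_message : Int) : List Int :=
  -- pieces starts as [bin(len_byte_message)[2:].zfill(32)]; the loop appends each byte's
  -- bin(byte)[2:].zfill(8); then tuple(map(int, ''.join(pieces))) — ''.join is concatenation
  (information.foldl
    (fun acc byte =>
      acc ++ [PySem.Chars.zfill (PySem.List.slice (PySem.Int.toBinChars0b byte) (some 2)) 8])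
    [PySem.Chars.zfill (PySem.List.slice (PySem.Int.toBinChars0b len_byte_message) (some 2)) 32]).flatten.map pvDigInt

-- ===== PORT B =====
-- 'while n > 0: out.append(n & 1); n >>= 1' — collects the low bit and halves each round
def pvLowBits (n : Int) (out : List Int) : List Int :=
  if _h : 0 < n then pvLowBits (n >>> (1 : Nat)) (out ++ [PySem.Int.band n 1]) else out
termination_by n.toNat
decreasing_by
  rw [Int.shiftRight_eq_div_pow]
  omega

-- _bits(n, width): the loop above, '[0]' if empty, reverse, then '[0] * (width - len(out)) + out'
def pvBitsB (n : Int) (width : Int) : List Int :=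
  let out := pvLowBits n []
  let out := if out.isEmpty then out ++ [0] else out
  let out := out.reverse
  List.replicate (width - (out.length : Int)).toNat 0 ++ out

def bin_message_py_alt (information : List Int) (len_byte_message : Int) : List Int :=
  -- result = _bits(len_byte_message, 32); then 'result += _bits(byte, 8)' for each byte
  information.foldl (fun acc byte => acc ++ pvBitsB byte 8) (pvBitsB len_byte_message 32)

-- ===== PRECONDITION & SPEC =====
-- Pre_ excludes negative ints, on which A raises ValueError (map(int, …) hits the 'b' of '-0b…').
def Pre_bin_message_py (information : List Int) (len_byte_message : Int) : Prop :=
  0 ≤ len_byte_message ∧ ∀ b ∈ information, 0 ≤ b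
instance (information : List Int) (len_byte_message : Int) : Decidable (Pre_bin_message_py information len_byte_message) := by unfold Pre_bin_message_py; infer_instance

def pvWitness_bin_message_py : List Int × Int := ([5, 200], 2)

def Spec_bin_message_py (information : List Int) (len_byte_message : Int) (out : List Int) : Prop := out = bin_message_py_alt information len_byte_message
instance (information : List Int) (len_byte_message : Int) (out : List Int) : Decidable (Spec_bin_message_py information len_byte_message out) := by unfold Spec_bin_message_py; infer_instance

-- ===== CLAIM (what is proved, stated in full; the proofs are below) =====
def Claim_equal_bin_message_py : Prop := ∀ (information : List Int) (len_byte_message : Int), Dom_bin_message_py information len_byte_message → Pre_bin_message_py information len_byte_message → Spec_bin_message_py information len_byte_message (bin_message_py information len_byte_message)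

-- ===== LEMMAS AND PROOFS =====

-- the big-endian bit list of a natural number (empty for 0)
def pvBits (n : Nat) : List Nat :=
  if _h : n = 0 then [] else pvBits (n / 2) ++ [n % 2]
decreasing_by exact Nat.div_lt_self (Nat.pos_of_ne_zero _h) (by norm_num)

lemma pvBits_zero : pvBits 0 = [] := by rw [pvBits]; simp

lemma pvBits_pos {n : Nat} (h : n ≠ 0) : pvBits n = pvBits (n / 2) ++ [n % 2] := by
  rw [pvBits]; simp [h]

lemma pvBits_mem {n x : Nat} (hx : x ∈ pvBits n) : x < 2 := by
  induction n using Nat.strong_induction_on with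
  | _ n ih =>
    by_cases h : n = 0
    · simp [h, pvBits_zero] at hx
    · rw [pvBits_pos h] at hx
      rcases List.mem_append.mp hx with h' | h'
      · exact ih (n / 2) (Nat.div_lt_self (Nat.pos_of_ne_zero h) (by norm_num)) h'
      · simp at h'; omega

-- canonical form: the bits of m, left-padded with zeros to width w (w ≥ bit length)
def pvPadded (w m : Nat) : List Int :=
  List.replicate (w - (pvBits m).length) 0 ++ (pvBits m).map Int.ofNat

-- A's chunk: bin(m)[2:] as chars
lemma slice2_toBinChars0b (m : Nat) :
    PySem.List.slice (PySem.Int.toBinChars0b (m : Int)) (some 2) = Nat.toDigits 2 m := by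
  rw [PySem.List.slice_from _ (by norm_num)]
  unfold PySem.Int.toBinChars0b
  rw [if_neg (by omega)]
  simp [Int.toNat_natCast]

-- characterisation of Nat.toDigits 2 via pvBits
lemma toDigitsCore_two (f : Nat) : ∀ (n : Nat) (ds : List Char), n < f →
    Nat.toDigitsCore 2 f n ds =
      (if n = 0 then ['0'] else (pvBits n).map Nat.digitChar) ++ ds := by
  induction f with
  | zero => intro n ds h; omega
  | succ f ih =>
    intro n ds h
    rw [Nat.toDigitsCore]
    by_cases h0 : n / 2 = 0
    · simp only [h0, if_true]
      by_cases hn : n = 0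
      · subst hn
        simp [show Nat.digitChar (0 % 2) = '0' from rfl]
      · have hn2 : n = 1 := by omega
        subst hn2
        rw [pvBits_pos (by norm_num), pvBits_zero]
        simp [show Nat.digitChar (1 % 2) = '1' from rfl]
    · simp only [h0, if_false]
      have hn : n ≠ 0 := by omega
      have hlt : n / 2 < f := by omega
      rw [ih (n / 2) _ hlt]
      simp only [h0, if_false, hn]
      rw [pvBits_pos hn]
      simp

lemma toDigits_two (m : Nat) :
    Nat.toDigits 2 m = (if m = 0 then ['0'] else (pvBits m).map Nat.digitChar) := by
  unfold Nat.toDigits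
  rw [toDigitsCore_two (m + 1) m [] (by omega)]
  simp

lemma toDigits_two_ne_nil (m : Nat) : Nat.toDigits 2 m ≠ [] := by
  rw [toDigits_two]
  by_cases h : m = 0
  · simp [h]
  · simp only [h, if_false]
    rw [pvBits_pos h]
    simp

lemma mem_toDigits_two {m : Nat} {c : Char} (hc : c ∈ Nat.toDigits 2 m) : c = '0' ∨ c = '1' := by
  rw [toDigits_two] at hc
  by_cases h : m = 0
  · simp [h] at hc; exact Or.inl hc
  · simp only [h, if_false, List.mem_map] at hc
    obtain ⟨b, hb, rfl⟩ := hc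
    have : b < 2 := pvBits_mem hb
    interval_cases b
    · exact Or.inl rfl
    · exact Or.inr rfl

lemma zfill_digits (w : Nat) (c : Char) (rest : List Char) (hc : ¬ (c = '+' ∨ c = '-')) :
    PySem.Chars.zfill (c :: rest) (w : Int) =
      List.replicate (w - (c :: rest).length) '0' ++ (c :: rest) := by
  simp only [PySem.Chars.zfill]
  split_ifs with h1
  · have : w - (c :: rest).length = 0 := by
      simp only [List.length_cons] at h1 ⊢; omega
    rw [this]; rfl
  · simp [Int.toNat_natCast]

lemma map_digInt_bits (m : Nat) :
    ((pvBits m).map Nat.digitChar).map pvDigInt = (pvBits m).map Int.ofNat := by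
  rw [List.map_map]
  apply List.map_congr_left
  intro b hb
  have : b < 2 := pvBits_mem hb
  interval_cases b <;> decide

-- A's fully reduced per-number chunk
lemma chunkA_eq (m w : Nat) (hw : 1 ≤ w) :
    (PySem.Chars.zfill (PySem.List.slice (PySem.Int.toBinChars0b (m : Int)) (some 2)) (w : Int)).map pvDigInt
      = pvPadded w m := by
  rw [slice2_toBinChars0b]
  rcases hhead : Nat.toDigits 2 m with _ | ⟨c, rest⟩
  · exact absurd hhead (toDigits_two_ne_nil m)
  · have hc : ¬ (c = '+' ∨ c = '-') := by
      have : c ∈ Nat.toDigits 2 m := by rw [hhead]; exact List.mem_cons_self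
      rcases mem_toDigits_two this with h | h <;> (subst h; decide)
    rw [zfill_digits w c rest hc, ← hhead]
    rw [List.map_append, List.map_replicate]
    rw [show pvDigInt '0' = 0 from rfl]
    unfold pvPadded
    by_cases h0 : m = 0
    · subst h0
      rw [toDigits_two]
      simp only [reduceIte, pvBits_zero, List.map_nil, List.append_nil,
        List.length_cons, List.length_nil]
      rw [show ['0'].map pvDigInt = [(0 : Int)] from rfl, ← List.replicate_succ']
      congr 1
      omega
    · conv_lhs => rw [toDigits_two]
      simp only [h0, if_false, List.length_map]
      rw [map_digInt_bits]

-- B's loop collects the bits low-to-high: reverse of pvBits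
lemma pvLowBits_spec (m : Nat) : ∀ acc : List Int,
    pvLowBits (m : Int) acc = acc ++ ((pvBits m).map Int.ofNat).reverse := by
  induction m using Nat.strong_induction_on with
  | _ m ih =>
    intro acc
    rw [pvLowBits.eq_def]
    by_cases h : m = 0
    · simp [h, pvBits_zero]
    · rw [dif_pos (by exact_mod_cast Nat.pos_of_ne_zero h)]
      have hsh : ((m : Int) >>> (1 : Nat)) = ((m / 2 : Nat) : Int) := by
        rw [Int.shiftRight_eq_div_pow, pow_one]; omega
      have hband : PySem.Int.band (m : Int) 1 = ((m % 2 : Nat) : Int) := by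
        rw [show ((1 : Int)) = ((1 : Nat) : Int) from rfl, PySem.Int.band_natCast,
          Nat.and_one_is_mod]
      rw [hsh, hband, ih (m / 2) (Nat.div_lt_self (Nat.pos_of_ne_zero h) (by norm_num))]
      conv_rhs => rw [pvBits_pos h]
      simp

-- B's fully reduced per-number chunk
lemma chunkB_eq (m w : Nat) (hw : 1 ≤ w) : pvBitsB (m : Int) (w : Int) = pvPadded w m := by
  unfold pvBitsB pvPadded
  rw [pvLowBits_spec m []]
  by_cases h0 : m = 0
  · subst h0
    rw [pvBits_zero]
    simp only [List.map_nil, List.reverse_nil, List.nil_append, List.isEmpty_nil, if_true]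
    simp only [List.reverse_cons, List.reverse_nil, List.nil_append, List.length_cons,
      List.length_nil, Nat.zero_add, Nat.cast_one, Nat.sub_zero, List.append_nil]
    rw [show ((w : Int) - 1).toNat = w - 1 by omega, ← List.replicate_succ']
    congr 1
    omega
  · have hne : ((pvBits m).map Int.ofNat).reverse ≠ [] := by
      rw [pvBits_pos h0]; simp
    simp only [List.nil_append, List.isEmpty_eq_false_iff.mpr hne, Bool.false_eq_true,
      if_false, List.reverse_reverse, List.length_map]
    congr 1
    congr 1
    omega

-- assembling A
lemma portA_shape (information : List Int) (len_byte_message : Int) :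
    bin_message_py information len_byte_message =
      (PySem.Chars.zfill (PySem.List.slice (PySem.Int.toBinChars0b len_byte_message) (some 2)) 32).map pvDigInt
        ++ information.flatMap (fun b =>
            (PySem.Chars.zfill (PySem.List.slice (PySem.Int.toBinChars0b b) (some 2)) 8).map pvDigInt) := by
  unfold bin_message_py
  rw [PySem.List.foldl_append_eq_flatMap]
  simp only [List.flatten_append, List.flatten_cons, List.flatten_nil, List.append_nil,
    List.map_append]
  congr 1
  induction information with
  | nil => rfl
  | cons x xs ih =>
    simp only [List.flatMap_cons, List.flatten_append, List.flatten_cons, List.flatten_nil,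
      List.append_nil, List.map_append, ih]

-- assembling B
lemma portB_shape (information : List Int) (len_byte_message : Int) :
    bin_message_py_alt information len_byte_message =
      pvBitsB len_byte_message 32 ++ information.flatMap (fun b => pvBitsB b 8) := by
  unfold bin_message_py_alt
  rw [PySem.List.foldl_append_eq_flatMap]

-- ===== VERDICT (by name: the statement is the Claim_ definition above) =====
theorem bin_message_py_spec : Claim_equal_bin_message_py := by
  intro information len_byte_message _hdom hpre
  unfold Spec_bin_message_py
  unfold Pre_bin_message_py at hpre
  obtain ⟨hlen, hall⟩ := hpre
  rw [portA_shape, portB_shape]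
  obtain ⟨m, rfl⟩ := Int.eq_ofNat_of_zero_le hlen
  congr 1
  · rw [show ((32 : Int)) = (((32 : Nat) : Nat) : Int) from by norm_num,
      chunkA_eq m 32 (by norm_num), chunkB_eq m 32 (by norm_num)]
  · apply List.flatMap_congr
    intro b hb
    obtain ⟨k, rfl⟩ := Int.eq_ofNat_of_zero_le (hall b hb)
    rw [show ((8 : Int)) = (((8 : Nat) : Nat) : Int) from by norm_num,
      chunkA_eq k 8 (by norm_num), chunkB_eq k 8 (by norm_num)]
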